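-- pv_equiv track=rewrite | github.com/YuiFC/srtp-medical-ai | code/data_preprocessing/data_loader.py | get_column_mapping
-- ===== SOURCE A (Python) =====
-- DIMENSION_MAPPING = {
--     # 人口统计学
--     'demographics': ['Q1', 'Q2', 'Q3', 'Q4', 'Q5'],
--
--     # HBM维度
--     '感知易感性': ['H1', 'H2', 'H3', 'H4'],
--     '感知严重性': ['S1', 'S2', 'S3', 'S4'],
--     '感知益处': ['B1', 'B2', 'B3', 'B4', 'B5'],
--     '感知障碍': ['R1', 'R2', 'R3', 'R4', 'R5', 'R6'],
--     '行动线索': ['C1', 'C2', 'C3', 'C4'],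
--     '自我效能': ['E1', 'E2', 'E3', 'E4'],
--
--     # AI接受度
--     'AI接受度': ['T1', 'T2', 'T3', 'T4', 'T5']
-- }
--
-- def get_column_mapping(df_columns):
--     """
--     自动识别列对应的维度
--
--     Parameters:
--     -----------
--     df_columns : list
--         DataFrame的列名
--
--     Returns:
--     --------
--     dict
--         列名到维度的映射
--     """
--     mapping = {}
--     for col in df_columns:
--         for dim, cols in DIMENSION_MAPPING.items():
--             if col in cols:
--                 mapping[col] = dim
--                 break
--     return mapping
-- ===== SOURCE B (Python) =====
-- DIMENSION_MAPPING = {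
--     'demographics': ['Q1', 'Q2', 'Q3', 'Q4', 'Q5'],
--     '感知易感性': ['H1', 'H2', 'H3', 'H4'],
--     '感知严重性': ['S1', 'S2', 'S3', 'S4'],
--     '感知益处': ['B1', 'B2', 'B3', 'B4', 'B5'],
--     '感知障碍': ['R1', 'R2', 'R3', 'R4', 'R5', 'R6'],
--     '行动线索': ['C1', 'C2', 'C3', 'C4'],
--     '自我效能': ['E1', 'E2', 'E3', 'E4'],
--     'AI接受度': ['T1', 'T2', 'T3', 'T4', 'T5']
-- }
--
-- # B: precompute a reverse lookup table column -> dimension once, then one flat pass.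
-- _REVERSE = {c: dim for dim, cols in DIMENSION_MAPPING.items() for c in cols}
--
-- def get_column_mapping(df_columns):
--     mapping = {}
--     for col in df_columns:
--         if col in _REVERSE:
--             mapping[col] = _REVERSE[col]
--     return mapping
-- ===== Notes on version B (the rewrite author's own statement) =====
-- stated objective: faster
-- what changed: Replaces the nested scan over DIMENSION_MAPPING (inner membership loop with break, per column) by a reverse lookup table built once, followed by a single flat pass over the columns.
import Mathlib
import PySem

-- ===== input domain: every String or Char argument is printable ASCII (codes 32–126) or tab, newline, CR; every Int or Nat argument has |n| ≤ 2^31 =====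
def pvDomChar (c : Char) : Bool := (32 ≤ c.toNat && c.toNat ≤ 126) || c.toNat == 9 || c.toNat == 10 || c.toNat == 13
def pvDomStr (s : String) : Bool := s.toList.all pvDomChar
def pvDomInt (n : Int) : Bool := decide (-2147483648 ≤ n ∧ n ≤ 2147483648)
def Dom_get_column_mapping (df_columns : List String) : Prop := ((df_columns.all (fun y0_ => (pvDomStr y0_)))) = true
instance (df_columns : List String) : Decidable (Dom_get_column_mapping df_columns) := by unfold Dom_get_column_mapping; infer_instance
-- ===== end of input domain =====

-- B replaces A's nested scan (inner membership loop with break) by a reverse lookup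
-- table built once plus a single flat pass over the columns (objective: faster — one precomputed table instead of a per-column scan).


def DIMENSION_MAPPING : List (String × List String) := [
  ("demographics", ["Q1", "Q2", "Q3", "Q4", "Q5"]),
  ("感知易感性", ["H1", "H2", "H3", "H4"]),
  ("感知严重性", ["S1", "S2", "S3", "S4"]),
  ("感知益处", ["B1", "B2", "B3", "B4", "B5"]),
  ("感知障碍", ["R1", "R2", "R3", "R4", "R5", "R6"]),
  ("行动线索", ["C1", "C2", "C3", "C4"]),
  ("自我效能", ["E1", "E2", "E3", "E4"]),
  ("AI接受度", ["T1", "T2", "T3", "T4", "T5"])]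

-- ===== PORT A =====
-- inner 'for dim, cols in DIMENSION_MAPPING.items(): if col in cols: … break'
def pvFindDim (col : String) : List (String × List String) → Option String
  | [] => none
  | (dim, cols) :: rest => if cols.contains col then some dim else pvFindDim col rest

def get_column_mapping (df_columns : List String) : List (String × String) :=
  (df_columns.foldl (fun (mapping : PySem.Dict String String) col =>
      match pvFindDim col DIMENSION_MAPPING with
      | some dim => mapping.insert col dim
      | none => mapping)
    PySem.Dict.empty).items

-- ===== PORT B =====
-- _REVERSE = {c: dim for dim, cols in DIMENSION_MAPPING.items() for c in cols}
def pvReverse : PySem.Dict String String :=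
  DIMENSION_MAPPING.foldl (fun d p => p.2.foldl (fun d c => d.insert c p.1) d) PySem.Dict.empty

def get_column_mapping_alt (df_columns : List String) : List (String × String) :=
  (df_columns.foldl (fun (mapping : PySem.Dict String String) col =>
      match pvReverse.get? col with
      | some dim => mapping.insert col dim
      | none => mapping)
    PySem.Dict.empty).items

-- ===== PRECONDITION & SPEC =====
def Spec_get_column_mapping (df_columns : List String) (out : List (String × String)) : Prop := out = get_column_mapping_alt df_columns
instance (df_columns : List String) (out : List (String × String)) : Decidable (Spec_get_column_mapping df_columns out) := by unfold Spec_get_column_mapping; infer_instance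

-- ===== CLAIM (what is proved, stated in full; the proofs are below) =====
def Claim_equal_get_column_mapping : Prop := ∀ (df_columns : List String), Dom_get_column_mapping df_columns → Spec_get_column_mapping df_columns (get_column_mapping df_columns)

-- ===== LEMMAS AND PROOFS =====
-- the flat reverse association list that pvReverse's items amount to
def pvFlat : List (String × String) :=
  DIMENSION_MAPPING.flatMap (fun p => p.2.map (fun c => (c, p.1)))

theorem find?_map_cols (col dim : String) (cols : List String) :
    ((cols.map (fun c => (c, dim))).find? (fun q => q.1 == col)).map (·.2)
      = if cols.contains col then some dim else none := by
  induction cols with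
  | nil => rfl
  | cons c cs ih =>
    simp only [List.map_cons, List.contains_cons]
    by_cases h : c == col
    · have hcc : (col == c) = true := by simp [(beq_iff_eq.mp h).symm]
      rw [List.find?_cons_of_pos (by simpa using h), if_pos (by simp [hcc])]
      rfl
    · have hcc : (col == c) = false := by
        simp only [beq_eq_false_iff_ne, ne_eq]
        exact fun e => h (by simp [e])
      rw [List.find?_cons_of_neg (by simpa using h), ih]
      simp only [hcc, Bool.false_or]

theorem findDim_flat (col : String) (pairs : List (String × List String)) :
    pvFindDim col pairs
      = ((pairs.flatMap (fun p => p.2.map (fun c => (c, p.1)))).find? (fun q => q.1 == col)).map (·.2) := by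
  induction pairs with
  | nil => rfl
  | cons p rest ih =>
    simp only [pvFindDim, List.flatMap_cons]
    rw [List.find?_append]
    by_cases h : p.2.contains col
    · have hm := find?_map_cols col p.1 p.2
      rw [if_pos h] at hm
      rcases Option.map_eq_some_iff.mp hm with ⟨q, hq, hq2⟩
      rw [if_pos h, hq]
      simp [hq2]
    · have hm := find?_map_cols col p.1 p.2
      rw [if_neg h] at hm
      have hnone : (p.2.map (fun c => (c, p.1))).find? (fun q => q.1 == col) = none :=
        Option.map_eq_none_iff.mp hm
      rw [if_neg h, hnone, ih]
      simp

set_option maxRecDepth 20000 in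
theorem findDim_eq_reverse (col : String) :
    pvFindDim col DIMENSION_MAPPING = pvReverse.get? col := by
  rw [findDim_flat]
  have hrev : pvReverse = PySem.Dict.mk pvFlat := by decide
  rw [hrev]
  have hflat : (DIMENSION_MAPPING.flatMap (fun p => p.2.map (fun c => (c, p.1)))) = pvFlat := rfl
  rw [hflat]
  simp [PySem.Dict.get?]

-- ===== VERDICT (by name: the statement is the Claim_ definition above) =====
set_option maxRecDepth 20000 in
theorem get_column_mapping_spec : Claim_equal_get_column_mapping := by
  intro df _
  show get_column_mapping df = get_column_mapping_alt df
  unfold get_column_mapping get_column_mapping_alt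
  have hfun : (fun (mapping : PySem.Dict String String) col =>
      match pvFindDim col DIMENSION_MAPPING with
      | some dim => mapping.insert col dim
      | none => mapping)
    = (fun (mapping : PySem.Dict String String) col =>
      match pvReverse.get? col with
      | some dim => mapping.insert col dim
      | none => mapping) := by
    funext mapping col
    rw [findDim_eq_reverse]
  rw [hfun]
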